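-- pv_equiv track=rewrite | github.com/jooaoj/minotauros | scripts/main.py | routing
-- ===== SOURCE A (Python) =====
-- from collections import deque
--
-- def routing(maze, moveLimit):
-- 	start = None
-- 	for i in range(len(maze)):
-- 		for j in range(len(maze[i])):
-- 			if maze[i][j] == '^':
-- 				start = (i, j)
-- 				break
-- 		if start:
-- 			break
-- 	if not start:
-- 		return None
--
-- 	directions = [ (-1, 0), (1, 0), (0, -1), (0, 1) ]
-- 	queue = deque( [ (start, [start], 0) ] )
-- 	visited = set([start])
--
-- 	while queue:
-- 		current, path, moves = queue.popleft()
--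
-- 		if maze[current[0]][current[1]] == 'E':
-- 			return path
--
-- 		if moves >= moveLimit:
-- 			continue
--
-- 		for direction in directions:
-- 			next = (current[0] + direction[0], current[1] + direction[1])
--
-- 			# 0 <= next < height and
-- 			# 0 <= next < width and
-- 			# not wall and
-- 			# not visited
-- 			if (0 <= next[0] < len(maze) and
-- 				0 <= next[1] < len(maze[0]) and
-- 				maze[next[0]][next[1]] != '#' and
-- 				next not in visited):
--
-- 				visited.add(next)
-- 				queue.append((next, path + [next], moves + 1))
--
-- 	return None
-- ===== SOURCE B (Python) =====
-- def routing(maze, moveLimit):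
-- 	start = next(((i, j) for i, row in enumerate(maze)
-- 	              for j, ch in enumerate(row) if ch == '^'), None)
-- 	if start is None:
-- 		return None
--
-- 	height, width = len(maze), len(maze[0])
-- 	parent = {start: None}            # doubles as the visited set
-- 	frontier = [start]
-- 	depth = 0
--
-- 	while frontier:
-- 		for cell in frontier:
-- 			if maze[cell[0]][cell[1]] == 'E':
-- 				path = []
-- 				while cell is not None:
-- 					path.append(cell)
-- 					cell = parent[cell]
-- 				path.reverse()
-- 				return path
--
-- 		if depth >= moveLimit:
-- 			return None
--
-- 		nxt = []
-- 		for ci, cj in frontier: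
-- 			for di, dj in ((-1, 0), (1, 0), (0, -1), (0, 1)):
-- 				nb = (ci + di, cj + dj)
-- 				if (0 <= nb[0] < height and 0 <= nb[1] < width and
-- 						maze[nb[0]][nb[1]] != '#' and nb not in parent):
-- 					parent[nb] = (ci, cj)
-- 					nxt.append(nb)
-- 		frontier = nxt
-- 		depth += 1
--
-- 	return None
-- ===== Notes on version B (the rewrite author's own statement) =====
-- stated objective: alternative
-- what changed: B replaces A's single FIFO queue whose entries each carry a full copied path by a level-synchronous BFS: it keeps only the current frontier list and a depth counter, scans each frontier for the exit, expands the whole frontier into the next one, and records a parent pointer per cell so the path is reconstructed once at the end.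
-- outside the precondition, e.g. on routing(['^.', '##', '.'], 5): A returns None, B returns None
import Mathlib
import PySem

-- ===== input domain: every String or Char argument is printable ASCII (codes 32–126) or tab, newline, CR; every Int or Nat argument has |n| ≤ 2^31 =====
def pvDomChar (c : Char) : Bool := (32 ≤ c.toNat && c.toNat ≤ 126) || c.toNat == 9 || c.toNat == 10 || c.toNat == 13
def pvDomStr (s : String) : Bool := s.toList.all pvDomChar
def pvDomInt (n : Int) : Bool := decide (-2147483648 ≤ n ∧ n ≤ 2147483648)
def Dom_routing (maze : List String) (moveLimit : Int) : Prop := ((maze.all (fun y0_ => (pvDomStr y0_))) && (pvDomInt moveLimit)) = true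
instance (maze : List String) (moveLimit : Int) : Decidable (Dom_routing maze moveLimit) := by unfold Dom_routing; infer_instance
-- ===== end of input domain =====

-- B replaces A's single FIFO queue of (cell, copied path, moves) entries by a level-synchronous BFS:
-- a frontier list per depth, a parent pointer per cell, and one path reconstruction at the end.

-- maze[i][j]; the default '?' is only read where Python would raise IndexError (excluded by Pre_)
def pvCharAt (maze : List String) (i j : Int) : Char :=
  ((PySem.List.pyGet? maze i).bind (fun r => PySem.Str.pyGet? r j)).getD '?'

def pvDirs : List (Int × Int) := [(-1, 0), (1, 0), (0, -1), (0, 1)]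

-- ===== PORT A =====
-- inner 'for j in range(len(maze[i])): if maze[i][j] == '^': start = (i, j); break'
def pvFindCol : List Char → Int → Option Int
  | [], _ => none
  | c :: rest, j => if c = '^' then some j else pvFindCol rest (j + 1)

-- outer 'for i in range(len(maze)): … if start: break'
def pvFindStart : List String → Int → Option (Int × Int)
  | [], _ => none
  | r :: rest, i =>
    match pvFindCol r.toList 0 with
    | some j => some (i, j)
    | none => pvFindStart rest (i + 1)

-- body of 'for direction in directions' (state = (queue after popleft, visited))
def pvStepA (maze : List String) (h w : Int) (cur : Int × Int) (path : List (Int × Int)) (moves : Int)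
    (st : List ((Int × Int) × List (Int × Int) × Int) × PySem.Set (Int × Int)) (d : Int × Int) :
    List ((Int × Int) × List (Int × Int) × Int) × PySem.Set (Int × Int) :=
  let nxt := (cur.1 + d.1, cur.2 + d.2)
  if 0 ≤ nxt.1 ∧ nxt.1 < h ∧ 0 ≤ nxt.2 ∧ nxt.2 < w ∧
      pvCharAt maze nxt.1 nxt.2 ≠ '#' ∧ PySem.Set.contains st.2 nxt = false then
    (st.1 ++ [(nxt, path ++ [nxt], moves + 1)], PySem.Set.add st.2 nxt)
  else st

-- 'while queue:' (fuel bounds the number of iterations; each grid cell is enqueued at most once)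
def pvLoopA (maze : List String) (h w moveLimit : Int) :
    Nat → List ((Int × Int) × List (Int × Int) × Int) → PySem.Set (Int × Int) →
    Option (List (Int × Int))
  | 0, _, _ => none
  | _ + 1, [], _ => none
  | fuel + 1, (cur, path, moves) :: rest, visited =>
    if pvCharAt maze cur.1 cur.2 = 'E' then some path
    else if moves ≥ moveLimit then pvLoopA maze h w moveLimit fuel rest visited
    else
      let st := pvDirs.foldl (pvStepA maze h w cur path moves) (rest, visited)
      pvLoopA maze h w moveLimit fuel st.1 st.2

def routing (maze : List String) (moveLimit : Int) : Option (List (Int × Int)) :=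
  match pvFindStart maze 0 with
  | none => none
  | some start =>
    let h : Int := PySem.List.len maze
    let w : Int := PySem.Str.len (PySem.List.pyGetD maze 0 "")
    let fuel : Nat := maze.length * (PySem.List.pyGetD maze 0 "").toList.length + 1
    pvLoopA maze h w moveLimit fuel [(start, [start], 0)] (PySem.Set.ofList [start])

-- ===== PORT B =====
-- 'next(((i, j) for i, row in enumerate(maze) for j, ch in enumerate(row) if ch == '^'), None)'
def pvFindStartAlt (maze : List String) : Option (Int × Int) :=
  (PySem.List.enumerate maze 0).findSome? (fun p =>
    (PySem.List.enumerate p.2.toList 0).findSome? (fun q =>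
      if q.2 = '^' then some (p.1, q.1) else none))

-- 'while cell is not None: path.append(cell); cell = parent[cell]'
-- (the getD default 'none' is never read when called: every chain cell is a key of parent)
def pvBacktrack (parent : PySem.Dict (Int × Int) (Option (Int × Int))) :
    Nat → Option (Int × Int) → List (Int × Int) → List (Int × Int)
  | 0, _, acc => acc
  | _ + 1, none, acc => acc
  | fuel + 1, some c, acc => pvBacktrack parent fuel (parent.getD c none) (acc ++ [c])

-- one neighbour test: body of 'for di, dj in …' (state = (nxt list, parent))
def pvVisit (maze : List String) (h w : Int) (cell : Int × Int)
    (st : List (Int × Int) × PySem.Dict (Int × Int) (Option (Int × Int))) (d : Int × Int) :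
    List (Int × Int) × PySem.Dict (Int × Int) (Option (Int × Int)) :=
  let nb := (cell.1 + d.1, cell.2 + d.2)
  if 0 ≤ nb.1 ∧ nb.1 < h ∧ 0 ≤ nb.2 ∧ nb.2 < w ∧
      pvCharAt maze nb.1 nb.2 ≠ '#' ∧ st.2.contains nb = false then
    (st.1 ++ [nb], st.2.insert nb (some cell))
  else st

-- 'for ci, cj in frontier: for di, dj in …' (expansion of one frontier cell)
def pvExpand (maze : List String) (h w : Int)
    (st : List (Int × Int) × PySem.Dict (Int × Int) (Option (Int × Int))) (cell : Int × Int) :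
    List (Int × Int) × PySem.Dict (Int × Int) (Option (Int × Int)) :=
  pvDirs.foldl (pvVisit maze h w cell) st

-- 'while frontier:' — one iteration per LEVEL: scan the frontier for 'E', else expand it whole
-- (fuel is consumed per frontier cell, mirroring the total number of BFS dequeues)
def pvLevelLoop (maze : List String) (h w moveLimit : Int) :
    Nat → List (Int × Int) → Int → PySem.Dict (Int × Int) (Option (Int × Int)) →
    Option (List (Int × Int))
  | 0, _, _, _ => none
  | _ + 1, [], _, _ => none
  | fuel + 1, c0 :: cs, depth, parent =>
    match (c0 :: cs).find? (fun c => pvCharAt maze c.1 c.2 == 'E') with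
    | some c => some ((pvBacktrack parent (parent.items.length + 1) (some c) []).reverse)
    | none =>
      if depth ≥ moveLimit then none
      else
        let st := (c0 :: cs).foldl (pvExpand maze h w) ([], parent)
        pvLevelLoop maze h w moveLimit (fuel + 1 - (c0 :: cs).length) st.1 (depth + 1) st.2
  termination_by fuel _ _ _ => fuel
  decreasing_by simp

def routing_alt (maze : List String) (moveLimit : Int) : Option (List (Int × Int)) :=
  match pvFindStartAlt maze with
  | none => none
  | some start =>
    let h : Int := PySem.List.len maze
    let w : Int := PySem.Str.len (PySem.List.pyGetD maze 0 "")
    let fuel : Nat := maze.length * (PySem.List.pyGetD maze 0 "").toList.length + 1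
    pvLevelLoop maze h w moveLimit fuel [start] 0 (PySem.Dict.ofList [(start, none)])

-- ===== PRECONDITION & SPEC =====
-- Pre_ excludes mazes that contain '^', have a row shorter than the first row, and allow at least one
-- move: there A's BFS can step over the end of a short row and raise IndexError (the column bound is
-- checked against len(maze[0]) only).
def Pre_routing (maze : List String) (moveLimit : Int) : Prop :=
  (∀ r ∈ maze, '^' ∉ r.toList) ∨
  (∀ r ∈ maze, (maze.headD "").toList.length ≤ r.toList.length) ∨
  moveLimit < 1
instance (maze : List String) (moveLimit : Int) : Decidable (Pre_routing maze moveLimit) := by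
  unfold Pre_routing; infer_instance

def pvWitness_routing : List String × Int := (["^..", ".#.", "..E"], 5)

def Spec_routing (maze : List String) (moveLimit : Int) (out : Option (List (Int × Int))) : Prop := out = routing_alt maze moveLimit
instance (maze : List String) (moveLimit : Int) (out : Option (List (Int × Int))) : Decidable (Spec_routing maze moveLimit out) := by unfold Spec_routing; infer_instance

-- ===== CLAIM (what is proved, stated in full; the proofs are below) =====
def Claim_equal_routing : Prop := ∀ (maze : List String) (moveLimit : Int), Dom_routing maze moveLimit → Pre_routing maze moveLimit → Spec_routing maze moveLimit (routing maze moveLimit)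

-- ===== LEMMAS AND PROOFS =====

-- A's per-entry expansion (dirs fold), as used once per dequeued level entry
def pvExpandA (maze : List String) (h w : Int)
    (st : List ((Int × Int) × List (Int × Int) × Int) × PySem.Set (Int × Int))
    (e : (Int × Int) × List (Int × Int) × Int) :
    List ((Int × Int) × List (Int × Int) × Int) × PySem.Set (Int × Int) :=
  pvDirs.foldl (pvStepA maze h w e.1 e.2.1 e.2.2) st

def pvInGrid (h w : Int) (c : Int × Int) : Prop :=
  0 ≤ c.1 ∧ c.1 < h ∧ 0 ≤ c.2 ∧ c.2 < w

-- rev is the reversed path c :: … :: start, linked through parent down to start (whose parent is None)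
def pvIsChain (parent : PySem.Dict (Int × Int) (Option (Int × Int))) : List (Int × Int) → Prop
  | [] => True
  | [c] => parent.get? c = some none
  | c :: c' :: rest => parent.get? c = some (some c') ∧ pvIsChain parent (c' :: rest)

-- what B's parent dict knows about one of A's queue entries (cell, path, moves)
def pvEntryOK (parent : PySem.Dict (Int × Int) (Option (Int × Int)))
    (e : (Int × Int) × List (Int × Int) × Int) : Prop :=
  e.2.1.reverse.head? = some e.1 ∧ pvIsChain parent e.2.1.reverse ∧
  e.2.1.length ≤ parent.items.length

-- the simulation relation between A's level-expansion state and B's (start cell s, old size P₀, level depth)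
def pvRel (_maze : List String) (h w : Int) (s : Int × Int) (P₀ : Nat) (depth : Int)
    (sa : List ((Int × Int) × List (Int × Int) × Int) × PySem.Set (Int × Int))
    (sb : List (Int × Int) × PySem.Dict (Int × Int) (Option (Int × Int))) : Prop :=
  sa.2 = sb.2.keys ∧
  sb.1 = sa.1.map (fun e => e.1) ∧
  (∀ e ∈ sa.1, pvEntryOK sb.2 e ∧ e.2.2 = depth + 1) ∧
  sb.2.keys.Nodup ∧
  (∀ k ∈ sb.2.keys, k = s ∨ pvInGrid h w k) ∧
  sb.2.items.length = P₀ + sa.1.length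

theorem pvKeysContains (d : PySem.Dict (Int × Int) (Option (Int × Int))) (c : Int × Int) :
    PySem.Set.contains d.keys c = d.contains c := by
  cases hb : PySem.Dict.contains d c
  · cases hs : PySem.Set.contains d.keys c
    · rfl
    · exact absurd ((PySem.Dict.contains_iff_mem_keys d c).mpr
        ((PySem.Set.contains_iff d.keys c).mp hs)) (by simp [hb])
  · exact (PySem.Set.contains_iff d.keys c).mpr ((PySem.Dict.contains_iff_mem_keys d c).mp hb)

theorem pvKeysLen (d : PySem.Dict (Int × Int) (Option (Int × Int))) :
    d.keys.length = d.items.length := by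
  have : d.keys = d.items.map Prod.fst := by simp [PySem.Dict.keys]
  rw [this, List.length_map]

theorem pvKeysCard (h w : Int) (s : Int × Int) (l : List (Int × Int))
    (hnd : l.Nodup) (hdom : ∀ k ∈ l, k = s ∨ pvInGrid h w k) :
    l.length ≤ h.toNat * w.toNat + 1 := by
  classical
  have hsub : l.toFinset ⊆ insert s ((Finset.Icc (0:Int) (h-1)) ×ˢ (Finset.Icc (0:Int) (w-1))) := by
    intro k hk
    rcases hdom k (List.mem_toFinset.mp hk) with rfl | hg
    · exact Finset.mem_insert_self _ _
    · refine Finset.mem_insert_of_mem ?_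
      rw [Finset.mem_product, Finset.mem_Icc, Finset.mem_Icc]
      obtain ⟨a, b, c, d⟩ := hg
      omega
  have hle := Finset.card_le_card hsub
  rw [List.toFinset_card_of_nodup hnd] at hle
  have hins := Finset.card_insert_le s ((Finset.Icc (0:Int) (h-1)) ×ˢ (Finset.Icc (0:Int) (w-1)))
  have hcard : ((Finset.Icc (0:Int) (h-1)) ×ˢ (Finset.Icc (0:Int) (w-1))).card = h.toNat * w.toNat := by
    rw [Finset.card_product, Int.card_Icc, Int.card_Icc]
    have h1 : (h - 1 + 1 - 0 : Int) = h := by ring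
    have h2 : (w - 1 + 1 - 0 : Int) = w := by ring
    rw [h1, h2]
  omega

theorem pvBacktrack_chain (parent : PySem.Dict (Int × Int) (Option (Int × Int))) :
    ∀ (rev : List (Int × Int)) (acc : List (Int × Int)) (f : Nat),
      pvIsChain parent rev → rev.length ≤ f →
      pvBacktrack parent f rev.head? acc = acc ++ rev := by
  intro rev
  induction rev with
  | nil =>
    intro acc f _ _
    cases f <;> simp [pvBacktrack]
  | cons c rest ih =>
    intro acc f hch hlen
    cases f with
    | zero => simp at hlen
    | succ f' =>
      have hstep : pvBacktrack parent (f' + 1) (c :: rest).head? acc =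
          pvBacktrack parent f' (parent.getD c none) (acc ++ [c]) := rfl
      cases rest with
      | nil =>
        have hget : parent.get? c = some none := hch
        have : parent.getD c none = none := by
          rw [PySem.Dict.getD_eq_get?_getD, hget]; rfl
        rw [hstep, this]
        cases f' <;> simp [pvBacktrack]
      | cons c' r' =>
        obtain ⟨hget, hch'⟩ := hch
        have : parent.getD c none = some c' := by
          rw [PySem.Dict.getD_eq_get?_getD, hget]; rfl
        rw [hstep, this]
        have := ih (acc ++ [c]) f' hch' (by simp at hlen ⊢; omega)
        simpa using this

theorem pvIsChain_insert (parent : PySem.Dict (Int × Int) (Option (Int × Int)))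
    (n : Int × Int) (v : Option (Int × Int)) (hn : parent.contains n = false) :
    ∀ rev, pvIsChain parent rev → pvIsChain (parent.insert n v) rev := by
  intro rev
  induction rev with
  | nil => intro _; trivial
  | cons c rest ih =>
    have hne : ∀ (x : Int × Int) (y : Option (Int × Int)), parent.get? x = some y → x ≠ n := by
      intro x y hx hxn
      subst hxn
      rw [PySem.Dict.contains_eq_isSome_get?, hx] at hn
      simp at hn
    cases rest with
    | nil =>
      intro hch
      have hget : parent.get? c = some none := hch
      show (parent.insert n v).get? c = some none
      rw [PySem.Dict.get?_insert_of_ne _ _ (hne c none hget)]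
      exact hget
    | cons c' r' =>
      intro hch
      obtain ⟨hget, hch'⟩ := hch
      exact ⟨by rw [PySem.Dict.get?_insert_of_ne _ _ (hne c (some c') hget)]; exact hget,
        ih hch'⟩

theorem pvEntryOK_insert (parent : PySem.Dict (Int × Int) (Option (Int × Int)))
    (n : Int × Int) (v : Option (Int × Int)) (hn : parent.contains n = false)
    (e : (Int × Int) × List (Int × Int) × Int) (he : pvEntryOK parent e) :
    pvEntryOK (parent.insert n v) e := by
  obtain ⟨h1, h2, h3⟩ := he
  refine ⟨h1, pvIsChain_insert parent n v hn _ h2, ?_⟩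
  rw [PySem.Dict.items_insert_of_not_contains _ _ hn]
  simp
  omega

-- queue-prefix commutation: pvStepA only appends to the queue and reads the visited set
theorem pvStepA_front (maze : List String) (h w : Int) (cur : Int × Int)
    (path : List (Int × Int)) (m : Int) (pre : List ((Int × Int) × List (Int × Int) × Int))
    (sa : List ((Int × Int) × List (Int × Int) × Int) × PySem.Set (Int × Int)) (d : Int × Int) :
    pvStepA maze h w cur path m (pre ++ sa.1, sa.2) d =
      (pre ++ (pvStepA maze h w cur path m sa d).1, (pvStepA maze h w cur path m sa d).2) := by
  unfold pvStepA
  dsimp only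
  by_cases hg : 0 ≤ cur.1 + d.1 ∧ cur.1 + d.1 < h ∧ 0 ≤ cur.2 + d.2 ∧ cur.2 + d.2 < w ∧
      pvCharAt maze (cur.1 + d.1) (cur.2 + d.2) ≠ '#' ∧ PySem.Set.contains sa.2 (cur.1 + d.1, cur.2 + d.2) = false
  · rw [if_pos hg, if_pos hg]; simp
  · rw [if_neg hg, if_neg hg]

theorem pvDirsFold_front (maze : List String) (h w : Int) (cur : Int × Int)
    (path : List (Int × Int)) (m : Int) (pre : List ((Int × Int) × List (Int × Int) × Int)) :
    ∀ (ds : List (Int × Int)) (sa : List ((Int × Int) × List (Int × Int) × Int) × PySem.Set (Int × Int)),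
      ds.foldl (pvStepA maze h w cur path m) (pre ++ sa.1, sa.2) =
        (pre ++ (ds.foldl (pvStepA maze h w cur path m) sa).1,
         (ds.foldl (pvStepA maze h w cur path m) sa).2) := by
  intro ds
  induction ds with
  | nil => intro sa; rfl
  | cons d ds ih =>
    intro sa
    rw [List.foldl_cons, List.foldl_cons, pvStepA_front]
    exact ih (pvStepA maze h w cur path m sa d)

-- OK-ness of a fixed entry survives one neighbour visit / a whole expansion
theorem pvVisit_OK_mono (maze : List String) (h w : Int) (c : Int × Int)
    (sb : List (Int × Int) × PySem.Dict (Int × Int) (Option (Int × Int))) (d : Int × Int)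
    (e : (Int × Int) × List (Int × Int) × Int) (he : pvEntryOK sb.2 e) :
    pvEntryOK (pvVisit maze h w c sb d).2 e := by
  unfold pvVisit
  dsimp only
  split_ifs with hg
  · exact pvEntryOK_insert _ _ _ hg.2.2.2.2.2 e he
  · exact he

theorem pvExpand_OK_mono (maze : List String) (h w : Int) (c : Int × Int)
    (sb : List (Int × Int) × PySem.Dict (Int × Int) (Option (Int × Int)))
    (e : (Int × Int) × List (Int × Int) × Int) (he : pvEntryOK sb.2 e) :
    pvEntryOK (pvExpand maze h w sb c).2 e := by
  unfold pvExpand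
  generalize pvDirs = ds
  induction ds generalizing sb with
  | nil => exact he
  | cons d ds ih => exact ih _ (pvVisit_OK_mono maze h w c sb d e he)

-- one neighbour: A's step and B's visit preserve the simulation relation
theorem pvVisit_rel (maze : List String) (h w : Int) (s : Int × Int) (P₀ : Nat) (depth : Int)
    (cur : Int × Int) (path : List (Int × Int)) (sa) (sb) (d : Int × Int)
    (hrel : pvRel maze h w s P₀ depth sa sb)
    (hcur : pvEntryOK sb.2 (cur, path, depth)) :
    pvRel maze h w s P₀ depth (pvStepA maze h w cur path depth sa d) (pvVisit maze h w cur sb d) ∧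
      pvEntryOK (pvVisit maze h w cur sb d).2 (cur, path, depth) := by
  obtain ⟨hk, hq, hents, hnd, hdomk, hcnt⟩ := hrel
  have hAc : PySem.Set.contains sa.2 (cur.1 + d.1, cur.2 + d.2) =
      sb.2.contains (cur.1 + d.1, cur.2 + d.2) := by
    rw [hk]; exact pvKeysContains sb.2 _
  unfold pvStepA pvVisit
  dsimp only
  by_cases hg : 0 ≤ cur.1 + d.1 ∧ cur.1 + d.1 < h ∧ 0 ≤ cur.2 + d.2 ∧ cur.2 + d.2 < w ∧
      pvCharAt maze (cur.1 + d.1) (cur.2 + d.2) ≠ '#' ∧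
      sb.2.contains (cur.1 + d.1, cur.2 + d.2) = false
  case neg =>
    rw [if_neg (by rw [hAc]; exact hg), if_neg hg]
    exact ⟨⟨hk, hq, hents, hnd, hdomk, hcnt⟩, hcur⟩
  case pos =>
    obtain ⟨c1, c2, c3, c4, c5, hmem⟩ := hg
    rw [if_pos ⟨c1, c2, c3, c4, c5, by rw [hAc]; exact hmem⟩, if_pos ⟨c1, c2, c3, c4, c5, hmem⟩]
    set nxt : Int × Int := (cur.1 + d.1, cur.2 + d.2) with hnxt
    have hnin : nxt ∉ sa.2 := by
      rw [hk]
      intro hmm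
      rw [(PySem.Dict.contains_iff_mem_keys sb.2 nxt).mpr hmm] at hmem
      cases hmem
    refine ⟨⟨?_, ?_, ?_, ?_, ?_, ?_⟩, pvEntryOK_insert _ _ _ hmem _ hcur⟩
    · show PySem.Set.add sa.2 nxt = (sb.2.insert nxt (some cur)).keys
      rw [PySem.Set.add_of_not_mem hnin, hk, PySem.Dict.keys_insert_of_not_contains _ _ hmem]
    · simp [hq]
    · intro e he
      simp only [List.mem_append, List.mem_singleton] at he
      rcases he with he | he
      · obtain ⟨hOK, hmv⟩ := hents e he
        exact ⟨pvEntryOK_insert _ _ _ hmem _ hOK, hmv⟩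
      · subst he
        obtain ⟨g1, g2, g3⟩ := hcur
        refine ⟨⟨by simp, ?_, ?_⟩, rfl⟩
        · -- chain nxt :: path.reverse in the inserted dict
          simp only [List.reverse_append, List.reverse_cons, List.reverse_nil, List.nil_append,
            List.singleton_append]
          obtain ⟨tl, htl⟩ : ∃ tl, path.reverse = cur :: tl := by
            cases hrev : path.reverse with
            | nil => rw [hrev] at g1; simp at g1
            | cons a t => rw [hrev] at g1; simp at g1; exact ⟨t, by rw [g1]⟩
          rw [htl]
          have hch : pvIsChain (sb.2.insert nxt (some cur)) (cur :: tl) := by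
            have := pvIsChain_insert sb.2 nxt (some cur) hmem (cur :: tl)
            rw [← htl] at this ⊢
            exact this g2
          exact ⟨by rw [PySem.Dict.get?_insert_self], hch⟩
        · rw [PySem.Dict.items_insert_of_not_contains _ _ hmem]
          simp
          omega
    · exact PySem.Dict.nodup_keys_insert sb.2 nxt (some cur) hnd
    · intro k hkm
      rw [PySem.Dict.keys_insert_of_not_contains _ _ hmem] at hkm
      simp only [List.mem_append, List.mem_singleton] at hkm
      rcases hkm with hkm | hkm
      · exact hdomk k hkm
      · subst hkm
        exact Or.inr ⟨c1, c2, c3, c4⟩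
    · rw [PySem.Dict.items_insert_of_not_contains _ _ hmem]
      simp
      omega

theorem pvExpandEntry_rel (maze : List String) (h w : Int) (s : Int × Int) (P₀ : Nat) (depth : Int)
    (e : (Int × Int) × List (Int × Int) × Int) (sa) (sb)
    (hrel : pvRel maze h w s P₀ depth sa sb)
    (he : pvEntryOK sb.2 e) (hd : e.2.2 = depth) :
    pvRel maze h w s P₀ depth (pvExpandA maze h w sa e) (pvExpand maze h w sb e.1) := by
  unfold pvExpandA pvExpand
  rw [hd]
  have he' : pvEntryOK sb.2 (e.1, e.2.1, depth) := by
    have heq : (e.1, e.2.1, depth) = e := by rw [← hd]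
    rw [heq]; exact he
  generalize pvDirs = ds
  clear he hd
  induction ds generalizing sa sb with
  | nil => exact hrel
  | cons d ds ih =>
    rw [List.foldl_cons, List.foldl_cons]
    obtain ⟨hrel', hcur'⟩ := pvVisit_rel maze h w s P₀ depth e.1 e.2.1 sa sb d hrel he'
    exact ih _ _ hrel' hcur'

theorem pvLevelFold_rel (maze : List String) (h w : Int) (s : Int × Int) (P₀ : Nat) (depth : Int) :
    ∀ (rest : List ((Int × Int) × List (Int × Int) × Int)) sa sb,
      pvRel maze h w s P₀ depth sa sb →
      (∀ e ∈ rest, pvEntryOK sb.2 e ∧ e.2.2 = depth) →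
      pvRel maze h w s P₀ depth (rest.foldl (pvExpandA maze h w) sa)
        ((rest.map (fun e => e.1)).foldl (pvExpand maze h w) sb) := by
  intro rest
  induction rest with
  | nil => intro sa sb hrel _; exact hrel
  | cons e rest ih =>
    intro sa sb hrel hok
    rw [List.map_cons, List.foldl_cons, List.foldl_cons]
    obtain ⟨he, hd⟩ := hok e (List.mem_cons_self ..)
    refine ih _ _ (pvExpandEntry_rel maze h w s P₀ depth e sa sb hrel he hd) ?_
    intro e' he'
    obtain ⟨hOK', hd'⟩ := hok e' (List.mem_cons_of_mem _ he')
    exact ⟨pvExpand_OK_mono maze h w e.1 sb e' hOK', hd'⟩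

-- A runs one whole level (expansion case, depth < moveLimit)
theorem pvLevelA_expand (maze : List String) (h w ml depth : Int) (hlt : ¬ depth ≥ ml) :
    ∀ (rest acc : List ((Int × Int) × List (Int × Int) × Int)) (vis : PySem.Set (Int × Int)) (fa : Nat),
      (∀ e ∈ rest, e.2.2 = depth) → rest.length ≤ fa →
      pvLoopA maze h w ml fa (rest ++ acc) vis =
        match rest.find? (fun e => pvCharAt maze e.1.1 e.1.2 == 'E') with
        | some e => some e.2.1
        | none =>
          pvLoopA maze h w ml (fa - rest.length)
            (rest.foldl (pvExpandA maze h w) (acc, vis)).1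
            (rest.foldl (pvExpandA maze h w) (acc, vis)).2 := by
  intro rest
  induction rest with
  | nil =>
    intro acc vis fa _ _
    simp only [List.find?_nil, List.nil_append, List.foldl_nil, List.length_nil, Nat.sub_zero]
  | cons e rest ih =>
    intro acc vis fa hd hfa
    obtain ⟨cur, path, mv⟩ := e
    have hmv : mv = depth := hd _ (List.mem_cons_self ..)
    cases fa with
    | zero => simp at hfa
    | succ fa' =>
      rw [List.cons_append, pvLoopA]
      by_cases hE : pvCharAt maze cur.1 cur.2 = 'E'
      · rw [if_pos hE, List.find?_cons_of_pos (by simp [hE])]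
      · rw [if_neg hE, if_neg (by rw [hmv]; exact hlt),
          List.find?_cons_of_neg (by simp [hE])]
        dsimp only
        have hfr := pvDirsFold_front maze h w cur path mv rest pvDirs (acc, vis)
        dsimp only at hfr
        rw [hfr]
        have := ih (pvDirs.foldl (pvStepA maze h w cur path mv) (acc, vis)).1
          (pvDirs.foldl (pvStepA maze h w cur path mv) (acc, vis)).2 fa'
          (fun e he => hd e (List.mem_cons_of_mem _ he)) (by simp at hfa ⊢; omega)
        rw [this]
        have hfoldl : (rest.foldl (pvExpandA maze h w)
            ((pvDirs.foldl (pvStepA maze h w cur path mv) (acc, vis)).1,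
             (pvDirs.foldl (pvStepA maze h w cur path mv) (acc, vis)).2)) =
            ((cur, path, mv) :: rest).foldl (pvExpandA maze h w) (acc, vis) := by
          rw [List.foldl_cons]; rfl
        rw [hfoldl]
        have hfa2 : fa' + 1 - ((cur, path, mv) :: rest).length = fa' - rest.length := by
          simp
        rw [hfa2]

-- A runs one whole level (skip case, depth ≥ moveLimit; the queue holds exactly this level)
theorem pvLevelA_skip (maze : List String) (h w ml depth : Int) (hge : depth ≥ ml) :
    ∀ (rest : List ((Int × Int) × List (Int × Int) × Int)) (vis : PySem.Set (Int × Int)) (fa : Nat),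
      (∀ e ∈ rest, e.2.2 = depth) → rest.length ≤ fa →
      pvLoopA maze h w ml fa rest vis =
        match rest.find? (fun e => pvCharAt maze e.1.1 e.1.2 == 'E') with
        | some e => some e.2.1
        | none => none := by
  intro rest
  induction rest with
  | nil =>
    intro vis fa _ _
    cases fa <;> rfl
  | cons e rest ih =>
    intro vis fa hd hfa
    obtain ⟨cur, path, mv⟩ := e
    have hmv : mv = depth := hd _ (List.mem_cons_self ..)
    cases fa with
    | zero => simp at hfa
    | succ fa' =>
      rw [pvLoopA]
      by_cases hE : pvCharAt maze cur.1 cur.2 = 'E'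
      · rw [if_pos hE, List.find?_cons_of_pos (by simp [hE])]
      · rw [if_neg hE, if_pos (by rw [hmv]; exact hge),
          List.find?_cons_of_neg (by simp [hE])]
        exact ih vis fa' (fun e he => hd e (List.mem_cons_of_mem _ he)) (by simp at hfa ⊢; omega)

-- the level-by-level simulation: A's queue holds exactly one level's entries
set_option maxHeartbeats 1000000 in
theorem pvSim (maze : List String) (h w ml : Int) (s : Int × Int) (G : Nat)
    (hhw : h.toNat * w.toNat ≤ G) :
    ∀ (fuel : Nat) (ents : List ((Int × Int) × List (Int × Int) × Int)) (depth : Int)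
      (parent : PySem.Dict (Int × Int) (Option (Int × Int))),
      (∀ e ∈ ents, e.2.2 = depth) →
      (∀ e ∈ ents, pvEntryOK parent e) →
      parent.keys.Nodup →
      (∀ k ∈ parent.keys, k = s ∨ pvInGrid h w k) →
      ents.length + (G + 1 - parent.items.length) ≤ fuel →
      pvLoopA maze h w ml fuel ents parent.keys =
        pvLevelLoop maze h w ml fuel (ents.map (fun e => e.1)) depth parent := by
  intro fuel
  induction fuel using Nat.strong_induction_on with
  | _ fuel IH =>
    intro ents depth parent hd hok hnd hdom hfuel
    have hPcard : parent.keys.length ≤ h.toNat * w.toNat + 1 := pvKeysCard h w s parent.keys hnd hdom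
    have hP : parent.items.length ≤ G + 1 := by rw [← pvKeysLen]; omega
    cases ents with
    | nil => cases fuel <;> simp [pvLoopA, pvLevelLoop]
    | cons e rest =>
      have h1 : 1 ≤ fuel := by simp at hfuel; omega
      cases fuel with
      | zero => omega
      | succ f =>
        rw [List.map_cons, pvLevelLoop, ← List.map_cons, List.find?_map]
        have hpred : ((fun c : Int × Int => pvCharAt maze c.1 c.2 == 'E') ∘
            (fun e : (Int × Int) × List (Int × Int) × Int => e.1)) =
            (fun e : (Int × Int) × List (Int × Int) × Int => pvCharAt maze e.1.1 e.1.2 == 'E') := rfl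
        rw [hpred]
        have hlen : ((e :: rest).length : Nat) ≤ f + 1 := by
          have := hfuel; simp at this ⊢; omega
        cases hfe : (e :: rest).find? (fun e => pvCharAt maze e.1.1 e.1.2 == 'E') with
        | some ef =>
          have hA : pvLoopA maze h w ml (f + 1) (e :: rest) parent.keys = some ef.2.1 := by
            by_cases hml : depth ≥ ml
            · rw [pvLevelA_skip maze h w ml depth hml (e :: rest) parent.keys (f + 1) hd hlen, hfe]
            · have hx := pvLevelA_expand maze h w ml depth hml (e :: rest) [] parent.keys (f + 1) hd hlen
              rw [List.append_nil] at hx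
              rw [hx, hfe]
          rw [hA]
          simp only [Option.map_some]
          obtain ⟨g1, g2, g3⟩ := hok ef (List.mem_of_find?_eq_some hfe)
          have hbt := pvBacktrack_chain parent ef.2.1.reverse [] (parent.items.length + 1) g2
            (by simp only [List.length_reverse]; omega)
          obtain ⟨tl, htl⟩ : ∃ tl, ef.2.1.reverse = ef.1 :: tl := by
            cases hrev : ef.2.1.reverse with
            | nil => rw [hrev] at g1; simp at g1
            | cons a t => rw [hrev] at g1; simp at g1; exact ⟨t, by rw [g1]⟩
          rw [htl] at hbt
          simp only [List.head?] at hbt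
          rw [← htl] at hbt
          simp only [hbt, List.nil_append, List.reverse_reverse]
        | none =>
          by_cases hml : depth ≥ ml
          · rw [pvLevelA_skip maze h w ml depth hml (e :: rest) parent.keys (f + 1) hd hlen, hfe,
              if_pos hml]
            rfl
          · have hx := pvLevelA_expand maze h w ml depth hml (e :: rest) [] parent.keys (f + 1) hd hlen
            rw [List.append_nil] at hx
            rw [hx, hfe, if_neg hml]
            dsimp only
            have hrel0 : pvRel maze h w s parent.items.length depth ([], parent.keys) ([], parent) := by
              unfold pvRel
              exact ⟨rfl, rfl, by intro e' he'; simp at he', hnd, hdom, by simp⟩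
            have hR := pvLevelFold_rel maze h w s parent.items.length depth (e :: rest)
              ([], parent.keys) ([], parent) hrel0 (fun e' he' => ⟨hok e' he', hd e' he'⟩)
            obtain ⟨r1, r2, r3, r4, r5, r6⟩ := hR
            have hP2 : (((e :: rest).map (fun e => e.1)).foldl (pvExpand maze h w) ([], parent)).2.items.length ≤ G + 1 := by
              have := pvKeysCard h w s _ r4 r5
              rw [pvKeysLen] at this
              omega
            have hIH := IH (f + 1 - (e :: rest).length) (by simp)
              ((e :: rest).foldl (pvExpandA maze h w) ([], parent.keys)).1 (depth + 1)
              (((e :: rest).map (fun e => e.1)).foldl (pvExpand maze h w) ([], parent)).2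
              (fun e' he' => (r3 e' he').2) (fun e' he' => (r3 e' he').1) r4 r5
              (by
                simp only [List.length_cons] at hfuel hlen ⊢
                omega)
            rw [r1, hIH, ← r2]
            simp [List.length_map]

theorem pvFindCol_enumerate (i : Int) : ∀ (cs : List Char) (j : Int),
    (PySem.List.enumerate cs j).findSome?
        (fun q => if q.2 = '^' then some (i, q.1) else none) =
      (pvFindCol cs j).map (fun jj => (i, jj)) := by
  intro cs
  induction cs with
  | nil => intro j; simp [PySem.List.enumerate_nil, pvFindCol]
  | cons c rest ih =>
    intro j
    rw [PySem.List.enumerate_cons, List.findSome?_cons, pvFindCol]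
    by_cases hc : c = '^'
    · simp [hc]
    · simp only [hc, if_false]
      exact ih (j + 1)

theorem pvFindStart_eq_aux : ∀ (rows : List String) (i : Int),
    (PySem.List.enumerate rows i).findSome? (fun p =>
        (PySem.List.enumerate p.2.toList 0).findSome? (fun q =>
          if q.2 = '^' then some (p.1, q.1) else none)) = pvFindStart rows i := by
  intro rows
  induction rows with
  | nil => intro i; simp [PySem.List.enumerate_nil, pvFindStart]
  | cons r rest ih =>
    intro i
    rw [PySem.List.enumerate_cons, List.findSome?_cons, pvFindStart,
      pvFindCol_enumerate i r.toList 0]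
    cases pvFindCol r.toList 0 with
    | none => simp only [Option.map_none]; exact ih (i + 1)
    | some j => rfl

theorem pvFindStart_eq (maze : List String) : pvFindStartAlt maze = pvFindStart maze 0 :=
  pvFindStart_eq_aux maze 0

-- ===== VERDICT (by name: the statement is the Claim_ definition above) =====
theorem routing_spec : Claim_equal_routing := by
  intro maze ml _ _
  unfold Spec_routing routing routing_alt
  rw [pvFindStart_eq]
  cases hs : pvFindStart maze 0 with
  | none => rfl
  | some start =>
    dsimp only
    have hkeys : PySem.Set.ofList [start] =
        (PySem.Dict.ofList [(start, (none : Option (Int × Int)))]).keys := rfl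
    rw [hkeys]
    have hsim := pvSim maze (PySem.List.len maze) (PySem.Str.len (PySem.List.pyGetD maze 0 "")) ml
      start (maze.length * (PySem.List.pyGetD maze 0 "").toList.length)
      (by simp [PySem.List.len_eq, PySem.Str.len_eq])
      (maze.length * (PySem.List.pyGetD maze 0 "").toList.length + 1)
      [(start, [start], 0)] 0 (PySem.Dict.ofList [(start, none)])
      (by intro e he; rw [List.mem_singleton] at he; subst he; rfl)
      (by
        intro e he
        rw [List.mem_singleton] at he
        subst he
        refine ⟨by simp, ?_, ?_⟩
        · show (PySem.Dict.ofList [(start, none)]).get? start = some none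
          simp [PySem.Dict.ofList, PySem.Dict.update, PySem.Dict.get?_insert_self]
        · exact le_rfl)
      (by
        show ([start] : List (Int × Int)).Nodup
        simp)
      (by
        intro k hk
        have : k ∈ ([start] : List (Int × Int)) := hk
        rw [List.mem_singleton] at this
        exact Or.inl this)
      (by
        show 1 + (maze.length * (PySem.List.pyGetD maze 0 "").toList.length + 1 - 1) ≤
          maze.length * (PySem.List.pyGetD maze 0 "").toList.length + 1
        omega)
    exact hsim
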